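-- pv_equiv track=rewrite | github.com/changlidavid/practice-platform | final/1754923206907sYV/期末整理/中等_列表/24T3.py | f
-- ===== SOURCE A (Python) =====
-- def f(start=1, nb_of_terms=1):
--     """
--     Generates a sequence and its reverse version.
--     The sequence begins with the given start value, and each subsequent element
--     is formed by adding the current position index to the previous element.
--
--     Parameters:
--     start: the initial value of the sequence, defaults to 1
--     nb_of_terms: the length of the sequence, defaults to 1
--
--     Returns:
--     A tuple pair where the first element is the original sequence (as a tuple)
--     and the second element is the reversed sequence (as a tuple)
--
--     Examples:
--     >>> f()
--     ((1,), (1,))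
--     >>> f(1, 2)
--     ((1, 2), (2, 1))
--     >>> f(1, 3)
--     ((1, 2, 4), (4, 2, 1))
--     >>> f(1, 4)
--     ((1, 2, 4, 7), (7, 4, 2, 1))
--     >>> f(1, 5)
--     ((1, 2, 4, 7, 11), (11, 7, 4, 2, 1))
--     >>> f(-10)
--     ((-10,), (-10,))
--     >>> f(-10, 2)
--     ((-10, -9), (-9, -10))
--     >>> f(5, 6)
--     ((5, 6, 8, 11, 15, 20), (20, 15, 11, 8, 6, 5))
--     >>> f(0, 7)
--     ((0, 1, 3, 6, 10, 15, 21), (21, 15, 10, 6, 3, 1, 0))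
--     >>> f(100, 3)
--     ((100, 101, 103), (103, 101, 100))
--     >>> f(-5, 4)
--     ((-5, -4, -2, 1), (1, -2, -4, -5))
--     """
--     if nb_of_terms == 1:
--         return ((start,), (start,))
--     else:
--         L = [start]
--         for i in range(nb_of_terms - 1):
--             L.append(L[i] + i + 1)
--         t1 = tuple(L)
--         t2 = tuple(reversed(L))
--         return (t1, t2)
-- ===== SOURCE B (Python) =====
-- def f(start=1, nb_of_terms=1):
--     n = nb_of_terms if nb_of_terms > 1 else 1
--     seq = tuple(start + i * (i + 1) // 2 for i in range(n))
--     return (seq, seq[::-1])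
-- ===== Notes on version B (the rewrite author's own statement) =====
-- stated objective: simpler
-- what changed: Replaces the accumulating loop (each element built from its predecessor via an indexed read) and the nb_of_terms==1 special case with a single closed-form comprehension: element i is start + i*(i+1)//2, the i-th triangular number, with the count clamped to at least 1.
import Mathlib
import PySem

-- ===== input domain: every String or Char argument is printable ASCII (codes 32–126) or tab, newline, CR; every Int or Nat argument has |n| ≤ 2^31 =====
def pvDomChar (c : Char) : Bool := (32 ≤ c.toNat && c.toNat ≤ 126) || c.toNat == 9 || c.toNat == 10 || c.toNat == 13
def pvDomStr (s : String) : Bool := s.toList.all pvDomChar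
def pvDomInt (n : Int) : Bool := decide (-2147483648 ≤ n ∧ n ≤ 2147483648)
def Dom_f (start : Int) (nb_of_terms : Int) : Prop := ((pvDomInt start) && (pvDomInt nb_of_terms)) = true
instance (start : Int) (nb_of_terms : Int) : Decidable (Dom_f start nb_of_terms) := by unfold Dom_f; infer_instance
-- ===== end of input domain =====

-- B replaces A's accumulating loop and its nb_of_terms==1 special case with a closed-form
-- comprehension (element i = start + i-th triangular number); objective: simpler. Same return value.

-- ===== PORT A =====
-- A: if nb_of_terms==1 return singleton; else loop appending L[i]+i+1 for i in range(nb_of_terms-1).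
def f (start : Int) (nb_of_terms : Int) : List Int × List Int :=
  if nb_of_terms = 1 then ([start], [start])
  else
    let L := (PySem.List.pyRange 0 (nb_of_terms - 1) 1).foldl
      (fun L i => L ++ [PySem.List.pyGetD L i 0 + i + 1]) [start]
    (L, L.reverse)

-- ===== PORT B =====
-- B: n = clamp to ≥ 1; seq = [start + i*(i+1)//2 for i in range(n)]; return (seq, seq[::-1]).
def f_alt (start : Int) (nb_of_terms : Int) : List Int × List Int :=
  let n := if nb_of_terms > 1 then nb_of_terms else 1
  let seq := (PySem.List.pyRange 0 n 1).map
    (fun i => start + PySem.Int.floordiv (i * (i + 1)) 2)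
  (seq, seq.reverse)

-- ===== PRECONDITION & SPEC =====
def Spec_f (start : Int) (nb_of_terms : Int) (out : List Int × List Int) : Prop := out = f_alt start nb_of_terms
instance (start : Int) (nb_of_terms : Int) (out : List Int × List Int) : Decidable (Spec_f start nb_of_terms out) := by unfold Spec_f; infer_instance

-- ===== CLAIM (what is proved, stated in full; the proofs are below) =====
def Claim_equal_f : Prop := ∀ (start : Int) (nb_of_terms : Int), Dom_f start nb_of_terms → Spec_f start nb_of_terms (f start nb_of_terms)

-- ===== LEMMAS AND PROOFS =====

-- triangular-number step: T(k+1) = T(k) + (k+1), where T i = (i*(i+1)) // 2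
theorem pv_tri_succ (k : Int) :
    PySem.Int.floordiv ((k + 1) * (k + 1 + 1)) 2 = PySem.Int.floordiv (k * (k + 1)) 2 + (k + 1) := by
  simp only [PySem.Int.floordiv]
  have h : (k + 1) * (k + 1 + 1) = k * (k + 1) + (k + 1) * 2 := by ring
  rw [h, Int.add_mul_fdiv_right _ _ (by norm_num)]

-- A's loop over range(m) produces exactly the closed-form list over range(m+1)
theorem pv_loop_eq (start : Int) (m : Nat) :
    (List.range m).foldl
        (fun L (k : Nat) => L ++ [PySem.List.pyGetD L (k : Int) 0 + (k : Int) + 1]) [start]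
      = (List.range (m + 1)).map
          (fun (k : Nat) => start + PySem.Int.floordiv ((k : Int) * ((k : Int) + 1)) 2) := by
  induction m with
  | zero => simp [PySem.Int.floordiv]
  | succ m ih =>
      rw [List.range_succ (n := m), List.foldl_append, ih]
      rw [List.range_succ (n := m + 1), List.map_append]
      simp only [List.foldl_cons, List.foldl_nil, List.map_cons, List.map_nil]
      congr 1
      have hlen : m < ((List.range (m + 1)).map
          (fun (k : Nat) => start + PySem.Int.floordiv ((k : Int) * ((k : Int) + 1)) 2)).length := by
        simp
      rw [PySem.List.pyGetD_natCast, List.getD_eq_getElem _ _ hlen]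
      simp only [List.getElem_map, List.getElem_range]
      have h := pv_tri_succ (m : Int)
      simp only [List.cons.injEq, and_true]
      push_cast
      linarith

theorem f_eq_f_alt (start nb : Int) : f start nb = f_alt start nb := by
  unfold f f_alt
  by_cases h1 : nb = 1
  · subst h1
    simp [PySem.List.pyRange_one, List.range_succ, PySem.Int.floordiv]
  · rw [if_neg h1]
    by_cases h2 : nb > 1
    · rw [if_pos h2]
      have hm : ∃ m : Nat, nb - 1 = (m : Int) ∧ nb = ((m + 1 : Nat) : Int) := by
        refine ⟨(nb - 1).toNat, by omega, by push_cast; omega⟩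
      obtain ⟨m, hm1, hm2⟩ := hm
      rw [hm1, hm2]
      simp only [PySem.List.pyRange_one, sub_zero, Int.toNat_natCast, zero_add,
        List.foldl_map, List.map_map]
      have h := pv_loop_eq start m
      exact congrArg (fun L => (L, L.reverse)) h
    · rw [if_neg h2]
      have he : nb.toNat - 1 = 0 := by omega
      simp [PySem.List.pyRange_one, he, List.range_succ, PySem.Int.floordiv]

-- ===== VERDICT (by name: the statement is the Claim_ definition above) =====
theorem f_spec : Claim_equal_f := by
  intro start nb _
  show f start nb = f_alt start nb
  exact f_eq_f_alt start nb
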